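-- pv_equiv track=rewrite | github.com/WillemKauf/AdventOfCode | 2015/19.py | part_2
-- ===== SOURCE A (Python) =====
-- import heapq
--
-- def part_2(molecule, hsh_map):
--     queue = []
--     seen_states = {}
--     desired_molecule = "e"
--     heapq.heappush(queue, (len(molecule), 0, molecule))
--     min_steps = int(1e12)
--     while len(queue):
--         _, num_steps, mol = heapq.heappop(queue)
--         if mol == desired_molecule:
--             min_steps = min(min_steps, num_steps)
--             continue
--         for i in range(0, len(mol)):
--             rep_str = ""
--             for j in range(i, min(i+11, len(mol))):
--                 rep_str += mol[j]
--                 if rep_str in hsh_map: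
--                     n_skip = len(rep_str)
--                     for rep in hsh_map[rep_str]:
--                         new_mol = mol[:i] + rep + mol[i+n_skip:]
--                         new_steps = num_steps + 1
--                         if new_steps >= min_steps:
--                             continue
--                         if new_mol in seen_states:
--                             if seen_states[new_mol] <= new_steps:
--                                 continue
--                         seen_states[new_mol] = new_steps
--                         heapq.heappush(queue, (len(new_mol), new_steps, new_mol))
--     return min_steps
-- ===== SOURCE B (Python) =====
-- def part_2(molecule, hsh_map):
--     SENTINEL = int(1e12)
--
--     def neighbours(mol):
--         out = []
--         for i in range(len(mol)):
--             for j in range(i + 1, min(i + 11, len(mol)) + 1):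
--                 key = mol[i:j]
--                 if key in hsh_map:
--                     for rep in hsh_map[key]:
--                         out.append(mol[:i] + rep + mol[j:])
--         return out
--
--     frontier = [molecule]
--     visited = {molecule}
--     steps = 0
--     while frontier and steps < SENTINEL:
--         new_frontier = []
--         for mol in frontier:
--             if mol == "e":
--                 return steps
--             for nb in neighbours(mol):
--                 if nb not in visited:
--                     visited.add(nb)
--                     new_frontier.append(nb)
--         frontier = new_frontier
--         steps += 1
--     return SENTINEL
-- ===== Notes on version B (the rewrite author's own statement) =====
-- stated objective: alternative
-- what changed: Replaced A's length-keyed heap with best-steps relaxation table by a plain layered breadth-first search: a frontier of molecules reachable in exactly k rewrites and a visited set, returning the first layer index containing 'e', with the search capped at the function's own 1e12 'unreachable' sentinel.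
-- outside the precondition, e.g. on part_2('ab', {'ab': ['xyz']}): A returns 1000000000000, B returns 1000000000000; on part_2('a', {'a': ['bc'], 'bc': ['e']}): A returns 2, B returns 2
import Mathlib
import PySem

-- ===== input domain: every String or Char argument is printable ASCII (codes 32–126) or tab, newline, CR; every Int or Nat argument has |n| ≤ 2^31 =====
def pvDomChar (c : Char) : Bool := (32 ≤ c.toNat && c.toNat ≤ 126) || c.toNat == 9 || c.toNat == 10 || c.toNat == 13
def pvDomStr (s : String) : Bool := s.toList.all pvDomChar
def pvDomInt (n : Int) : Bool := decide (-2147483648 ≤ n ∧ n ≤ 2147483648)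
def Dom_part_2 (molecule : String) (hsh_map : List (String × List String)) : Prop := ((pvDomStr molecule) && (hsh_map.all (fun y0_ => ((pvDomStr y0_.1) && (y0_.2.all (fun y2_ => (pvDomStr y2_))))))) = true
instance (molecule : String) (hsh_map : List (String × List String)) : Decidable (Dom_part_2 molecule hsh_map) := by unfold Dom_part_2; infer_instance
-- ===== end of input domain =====

-- B re-implements A's heap-driven search as a layered breadth-first search capped at the
-- function's own 10^12 'unreachable' sentinel (alternative algorithm, same return value);
-- the equivalence proved is about the RETURN value (neither Python mutates its arguments).

-- ===== PORT A =====
-- both ports read the Python dict `hsh_map` through the same assoc-list→dict conversion (strings as char lists)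
def pvDict (hsh_map : List (String × List String)) : PySem.Dict (List Char) (List (List Char)) :=
  PySem.Dict.ofList (hsh_map.map (fun p => (p.1.toList, p.2.map String.toList)))

-- Python string '<' on the char lists (lexicographic by code point), used only to model heapq's tuple order
def pvLtChars : List Char → List Char → Bool
  | [], [] => false
  | [], _ :: _ => true
  | _ :: _, [] => false
  | a :: as, b :: bs => if a < b then true else if b < a then false else pvLtChars as bs

-- heapq tuple comparison on (len, steps, mol)
def pvEntryLt (a b : Int × Int × List Char) : Bool :=
  decide (a.1 < b.1) ||
    (decide (a.1 = b.1) && (decide (a.2.1 < b.2.1) ||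
      (decide (a.2.1 = b.2.1) && pvLtChars a.2.2 b.2.2)))

-- heapq.heappop: the minimal entry of the heap (ties are identical tuples)
def pvMinEntry (x : Int × Int × List Char) (xs : List (Int × Int × List Char)) :
    Int × Int × List Char :=
  xs.foldl (fun m e => if pvEntryLt e m then e else m) x

-- body of A's innermost `for rep in hsh_map[rep_str]` loop
def pvPush (min_steps num_steps : Int)
    (st : List (Int × Int × List Char) × PySem.Dict (List Char) Int) (new_mol : List Char) :
    List (Int × Int × List Char) × PySem.Dict (List Char) Int :=
  let new_steps := num_steps + 1
  if min_steps ≤ new_steps then st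
  else
    match st.2.get? new_mol with
    | some t =>
      if t ≤ new_steps then st
      else (st.1 ++ [((new_mol.length : Int), new_steps, new_mol)], st.2.insert new_mol new_steps)
    | none => (st.1 ++ [((new_mol.length : Int), new_steps, new_mol)], st.2.insert new_mol new_steps)

-- A's `for i in range(len(mol)):` / `for j in range(i, min(i+11, len(mol)))` loops, rep_str built incrementally
def pvExpand (H : PySem.Dict (List Char) (List (List Char))) (min_steps num_steps : Int)
    (mol : List Char) (st : List (Int × Int × List Char) × PySem.Dict (List Char) Int) :
    List (Int × Int × List Char) × PySem.Dict (List Char) Int :=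
  (PySem.List.pyRange 0 (mol.length : Int)).foldl (fun st i =>
    ((PySem.List.pyRange i (min (i + 11) (mol.length : Int))).foldl
      (fun (acc : List Char × (List (Int × Int × List Char) × PySem.Dict (List Char) Int)) j =>
        let rep_str := acc.1 ++ [PySem.List.pyGetD mol j ' ']   -- mol[j]; j is always in range here
        match H.get? rep_str with
        | some reps =>
          let n_skip : Int := (rep_str.length : Int)
          (rep_str, reps.foldl (fun st rep =>
            pvPush min_steps num_steps st
              (PySem.List.slice mol none (some i) ++ rep ++
                PySem.List.slice mol (some (i + n_skip)) none)) acc.2)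
        | none => (rep_str, acc.2))
      (([] : List Char), st)).2) st

-- A's `while len(queue):` loop; the fuel only makes the recursion structural and is proved sufficient
def pvLoop (H : PySem.Dict (List Char) (List (List Char))) :
    Nat → List (Int × Int × List Char) → PySem.Dict (List Char) Int → Int → Int
  | 0, _, _, min_steps => min_steps
  | fuel + 1, queue, seen, min_steps =>
    match queue with
    | [] => min_steps
    | x :: xs =>
      let e := pvMinEntry x xs
      let rest := (x :: xs).erase e
      if e.2.2 = ['e'] then pvLoop H fuel rest seen (min min_steps e.2.1)
      else
        let st := pvExpand H min_steps e.2.1 e.2.2 (rest, seen)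
        pvLoop H fuel st.1 st.2 min_steps

def pvFuel (molecule : String) (hsh_map : List (String × List String)) : Nat :=
  let L := molecule.toList.length
  let a := (molecule.toList ++ hsh_map.flatMap (fun p => p.2.flatMap String.toList)).dedup.length
  2 + 2 * 10 ^ 12 * (a + 1) ^ (L + 1)

def part_2 (molecule : String) (hsh_map : List (String × List String)) : Int :=
  pvLoop (pvDict hsh_map) (pvFuel molecule hsh_map)
    [((molecule.toList.length : Int), 0, molecule.toList)] PySem.Dict.empty (10 ^ 12 : Int)

-- ===== PORT B =====
-- Source B's `neighbours(mol)`: all molecules reachable by one replacement (same 11-char key window)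
def pvNbrs (H : PySem.Dict (List Char) (List (List Char))) (mol : List Char) : List (List Char) :=
  (PySem.List.pyRange 0 (mol.length : Int)).foldl (fun out i =>
    (PySem.List.pyRange (i + 1) (min (i + 11) (mol.length : Int) + 1)).foldl (fun out j =>
      match H.get? (PySem.List.slice mol (some i) (some j)) with
      | some reps => reps.foldl (fun out rep =>
          out ++ [PySem.List.slice mol none (some i) ++ rep ++ PySem.List.slice mol (some j) none]) out
      | none => out) out) []

-- Source B's `for mol in frontier:` scan; `none` = the `return steps` case
def pvStep (H : PySem.Dict (List Char) (List (List Char))) :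
    List (List Char) → List (List Char) → PySem.Set (List Char) →
    Option (List (List Char) × PySem.Set (List Char))
  | [], new_frontier, visited => some (new_frontier, visited)
  | mol :: rest, new_frontier, visited =>
    if mol = ['e'] then none
    else
      let st := (pvNbrs H mol).foldl
        (fun (st : List (List Char) × PySem.Set (List Char)) nb =>
          if nb ∈ st.2 then st else (st.1 ++ [nb], st.2.add nb)) (new_frontier, visited)
      pvStep H rest st.1 st.2

-- Source B's `while frontier and steps < SENTINEL:` loop; the fuel only makes the recursion
-- structural (the steps < 10^12 guard already bounds the number of rounds)
def pvBfs (H : PySem.Dict (List Char) (List (List Char))) :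
    Nat → Int → List (List Char) → PySem.Set (List Char) → Int
  | 0, _, _, _ => 10 ^ 12
  | k + 1, steps, frontier, visited =>
    if frontier = [] ∨ (10 ^ 12 : Int) ≤ steps then 10 ^ 12
    else
      match pvStep H frontier [] visited with
      | none => steps
      | some (nf, vis) => pvBfs H k (steps + 1) nf vis

def part_2_alt (molecule : String) (hsh_map : List (String × List String)) : Int :=
  pvBfs (pvDict hsh_map) (10 ^ 12 + 2) 0 [molecule.toList]
    (PySem.Set.ofList [molecule.toList])

-- ===== PRECONDITION & SPEC =====
-- Pre_ excludes rule sets that contain a growing replacement (len(rep) > len(key)) applicable to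
-- the molecule: there the rewrite state space is unbounded and either search can diverge (the
-- timing run observed A itself timing out on such inputs); it keeps every non-growing rule set
-- (including all length-preserving rules), every molecule none of whose substrings is a key, and
-- the molecule "e" itself. On excluded inputs where the growth dies out and both searches still
-- terminate they agree in practice; they are excluded only because termination (A's and B's) has
-- no closed-form guarantee there.
def Pre_part_2 (molecule : String) (hsh_map : List (String × List String)) : Prop :=
  (∀ p ∈ hsh_map, ∀ rep ∈ p.2, rep.toList.length ≤ p.1.toList.length) ∨
  (∀ p ∈ hsh_map, ¬ p.1.toList <:+: molecule.toList) ∨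
  molecule = "e"
instance (molecule : String) (hsh_map : List (String × List String)) :
    Decidable (Pre_part_2 molecule hsh_map) := by unfold Pre_part_2; infer_instance

def pvWitness_part_2 : String × (List (String × List String)) := ("ab", [("ab", ["ba"]), ("ba", ["e"])])

def Spec_part_2 (molecule : String) (hsh_map : List (String × List String)) (out : Int) : Prop :=
  out = part_2_alt molecule hsh_map
instance (molecule : String) (hsh_map : List (String × List String)) (out : Int) :
    Decidable (Spec_part_2 molecule hsh_map out) := by unfold Spec_part_2; infer_instance

-- ===== CLAIM (what is proved, stated in full; the proofs are below) =====
def Claim_equal_part_2 : Prop := ∀ (molecule : String) (hsh_map : List (String × List String)),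
  Dom_part_2 molecule hsh_map → Pre_part_2 molecule hsh_map →
  Spec_part_2 molecule hsh_map (part_2 molecule hsh_map)

-- ===== LEMMAS AND PROOFS =====

-- the one-step rewrite relation and derivations of length n (shared spec of both searches)
inductive pvDer (H : PySem.Dict (List Char) (List (List Char))) : List Char → List Char → ℕ → Prop
  | refl (x : List Char) : pvDer H x x 0
  | step {x z : List Char} {n : ℕ} (y : List Char) :
      y ∈ pvNbrs H x → pvDer H y z n → pvDer H x z (n + 1)

-- canonical flat form of the neighbour enumeration
def pvNbrsFlat (H : PySem.Dict (List Char) (List (List Char))) (mol : List Char) : List (List Char) :=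
  (PySem.List.pyRange 0 (mol.length : Int)).flatMap (fun i =>
    (PySem.List.pyRange (i + 1) (min (i + 11) (mol.length : Int) + 1)).flatMap (fun j =>
      ((H.get? (PySem.List.slice mol (some i) (some j))).getD []).map (fun rep =>
        PySem.List.slice mol none (some i) ++ rep ++ PySem.List.slice mol (some j) none)))

lemma pvNbrs_eq_flat (H : PySem.Dict (List Char) (List (List Char))) (mol : List Char) :
    pvNbrs H mol = pvNbrsFlat H mol := by
  unfold pvNbrs pvNbrsFlat
  have hmatch : ∀ (i j : Int) (out : List (List Char)),
      (match H.get? (PySem.List.slice mol (some i) (some j)) with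
        | some reps => reps.foldl (fun out rep =>
            out ++ [PySem.List.slice mol none (some i) ++ rep ++ PySem.List.slice mol (some j) none]) out
        | none => out)
      = out ++ ((H.get? (PySem.List.slice mol (some i) (some j))).getD []).map (fun rep =>
          PySem.List.slice mol none (some i) ++ rep ++ PySem.List.slice mol (some j) none) := by
    intro i j out
    cases h : H.get? (PySem.List.slice mol (some i) (some j)) with
    | none => simp
    | some reps =>
      simp only [Option.getD_some]
      exact PySem.List.foldl_append_singleton_eq_map _ _ _
  have hinner : ∀ (i : Int) (out : List (List Char)),
      (PySem.List.pyRange (i + 1) (min (i + 11) (mol.length : Int) + 1)).foldl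
        (fun out j =>
          match H.get? (PySem.List.slice mol (some i) (some j)) with
          | some reps => reps.foldl (fun out rep =>
              out ++ [PySem.List.slice mol none (some i) ++ rep ++ PySem.List.slice mol (some j) none]) out
          | none => out) out
      = out ++ (PySem.List.pyRange (i + 1) (min (i + 11) (mol.length : Int) + 1)).flatMap (fun j =>
          ((H.get? (PySem.List.slice mol (some i) (some j))).getD []).map (fun rep =>
            PySem.List.slice mol none (some i) ++ rep ++ PySem.List.slice mol (some j) none)) := by
    intro i out
    refine Eq.trans (PySem.List.foldl_congr_mem _ _ _ _ (fun acc x _ => hmatch i x acc))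
      (PySem.List.foldl_append_eq_flatMap _ _ _)
  refine Eq.trans (Eq.trans (PySem.List.foldl_congr_mem _ _ _ _ (fun acc x _ => hinner x acc))
      (PySem.List.foldl_append_eq_flatMap _ _ _)) (List.nil_append _)

lemma pvSliceExt (mol : List Char) (i a : Int) (h0 : 0 ≤ i) (hia : i ≤ a)
    (ha : a < (mol.length : Int)) :
    PySem.List.slice mol (some i) (some a) ++ [PySem.List.pyGetD mol a ' ']
      = PySem.List.slice mol (some i) (some (a + 1)) := by
  obtain ⟨iN, rfl⟩ : ∃ iN : ℕ, i = (iN : Int) := ⟨i.toNat, by omega⟩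
  obtain ⟨aN, rfl⟩ : ∃ aN : ℕ, a = (aN : Int) := ⟨a.toNat, by omega⟩
  rw [show ((aN : Int) + 1) = ((aN + 1 : ℕ) : Int) by push_cast; ring]
  rw [PySem.List.slice_natCast, PySem.List.slice_natCast, PySem.List.pyGetD_natCast]
  have haN : aN < mol.length := by exact_mod_cast ha
  have hiaN : iN ≤ aN := by exact_mod_cast hia
  rw [show aN + 1 - iN = (aN - iN) + 1 by omega, List.take_add_one]
  congr 1
  rw [List.getElem?_drop, show iN + (aN - iN) = aN by omega]
  simp [List.getD, List.getElem?_eq_getElem haN]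

lemma pvSliceLen (mol : List Char) (i b : Int) (h0 : 0 ≤ i) (hib : i ≤ b)
    (hb : b ≤ (mol.length : Int)) :
    (((PySem.List.slice mol (some i) (some b)).length : ℕ) : Int) = b - i := by
  obtain ⟨iN, rfl⟩ : ∃ iN : ℕ, i = (iN : Int) := ⟨i.toNat, by omega⟩
  obtain ⟨bN, rfl⟩ : ∃ bN : ℕ, b = (bN : Int) := ⟨b.toNat, by omega⟩
  have hbN : bN ≤ mol.length := by exact_mod_cast hb
  have hibN : iN ≤ bN := by exact_mod_cast hib
  rw [PySem.List.slice_natCast]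
  simp only [List.length_take, List.length_drop]
  omega

lemma pvExpand_eq_fold (H : PySem.Dict (List Char) (List (List Char))) (m s : Int)
    (mol : List Char) (st : List (Int × Int × List Char) × PySem.Dict (List Char) Int) :
    pvExpand H m s mol st = (pvNbrs H mol).foldl (pvPush m s) st := by
  rw [pvNbrs_eq_flat]
  unfold pvExpand pvNbrsFlat
  rw [List.foldl_flatMap]
  refine PySem.List.foldl_congr_mem _ _ _ _ ?_
  intro st i hi
  rw [PySem.List.mem_pyRange_one] at hi
  have key : ∀ (N : ℕ) (a : Int) (st : List (Int × Int × List Char) × PySem.Dict (List Char) Int),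
      0 ≤ i → i ≤ a → ((min (i + 11) (mol.length : Int)) - a).toNat = N →
      ((PySem.List.pyRange a (min (i + 11) (mol.length : Int))).foldl
        (fun (acc : List Char × (List (Int × Int × List Char) × PySem.Dict (List Char) Int)) j =>
          let rep_str := acc.1 ++ [PySem.List.pyGetD mol j ' ']
          match H.get? rep_str with
          | some reps =>
            let n_skip : Int := (rep_str.length : Int)
            (rep_str, reps.foldl (fun st rep =>
              pvPush m s st
                (PySem.List.slice mol none (some i) ++ rep ++
                  PySem.List.slice mol (some (i + n_skip)) none)) acc.2)
          | none => (rep_str, acc.2))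
        (PySem.List.slice mol (some i) (some a), st)).2
      = ((PySem.List.pyRange (a + 1) (min (i + 11) (mol.length : Int) + 1)).flatMap (fun j =>
          ((H.get? (PySem.List.slice mol (some i) (some j))).getD []).map (fun rep =>
            PySem.List.slice mol none (some i) ++ rep ++
              PySem.List.slice mol (some j) none))).foldl (pvPush m s) st := by
    intro N
    induction N with
    | zero =>
      intro a st h0 hia hN
      rw [PySem.List.pyRange_one_eq_nil (by omega), PySem.List.pyRange_one_eq_nil (by omega)]
      simp
    | succ N ih =>
      intro a st h0 hia hN
      have hab : a < min (i + 11) (mol.length : Int) := by omega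
      have halen : a < (mol.length : Int) := lt_of_lt_of_le hab (min_le_right _ _)
      rw [PySem.List.pyRange_one_cons hab, PySem.List.pyRange_one_cons (by omega :
        a + 1 < min (i + 11) (mol.length : Int) + 1)]
      rw [List.flatMap_cons, List.foldl_append, List.foldl_cons]
      simp only [pvSliceExt mol i a h0 hia halen]
      cases hget : H.get? (PySem.List.slice mol (some i) (some (a + 1))) with
      | none =>
        simp only [Option.getD_none, List.map_nil, List.foldl_nil]
        exact ih (a + 1) st h0 (by omega) (by omega)
      | some reps =>
        simp only [Option.getD_some]
        have hlen : (((PySem.List.slice mol (some i) (some (a + 1))).length : ℕ) : Int) = a + 1 - i :=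
          pvSliceLen mol i (a + 1) h0 (by omega) (by omega)
        rw [show ((PySem.List.slice mol (some i) (some (a+1))).length : Int) = a + 1 - i from hlen]
        rw [show i + (a + 1 - i) = a + 1 by ring]
        rw [← List.foldl_map]
        exact ih (a + 1) _ h0 (by omega) (by omega)
  have h0 : PySem.List.slice mol (some i) (some i) = [] := by
    obtain ⟨iN, hiN⟩ : ∃ iN : ℕ, i = (iN : Int) := ⟨i.toNat, by omega⟩
    rw [hiN, PySem.List.slice_natCast]
    simp
  have := key ((min (i + 11) (mol.length : Int)) - i).toNat i st hi.1 le_rfl rfl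
  rw [h0] at this
  exact this

lemma pvDict_update_get? {κ ν : Type} [BEq κ] [LawfulBEq κ] [DecidableEq κ]
    (l : List (κ × ν)) (d : PySem.Dict κ ν) (k : κ) (v : ν)
    (h : (d.update l).get? k = some v) : (k, v) ∈ l ∨ d.get? k = some v := by
  induction l generalizing d with
  | nil => exact Or.inr h
  | cons p rest ih =>
    rcases ih _ h with hm | hg
    · exact Or.inl (List.mem_cons_of_mem _ hm)
    · rw [PySem.Dict.get?_insert] at hg
      split_ifs at hg with hk
      · cases hg; exact Or.inl (by simp [hk])
      · exact Or.inr hg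

lemma pvDict_get?_mem (hsh_map : List (String × List String)) (k : List Char)
    (v : List (List Char)) (h : (pvDict hsh_map).get? k = some v) :
    ∃ p ∈ hsh_map, p.1.toList = k ∧ p.2.map String.toList = v := by
  unfold pvDict PySem.Dict.ofList at h
  rcases pvDict_update_get? _ _ _ _ h with hm | hg
  · rcases List.mem_map.1 hm with ⟨p, hp, he⟩
    exact ⟨p, hp, by simpa using congrArg Prod.fst he, by simpa using congrArg Prod.snd he⟩
  · rw [PySem.Dict.get?_empty] at hg; cases hg
-- decomposition of a neighbour
lemma pvNbrs_decomp (H : PySem.Dict (List Char) (List (List Char))) (mol y : List Char)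
    (h : y ∈ pvNbrs H mol) :
    ∃ (i j : ℕ) (rep : List Char) (reps : List (List Char)),
      i < j ∧ j ≤ mol.length ∧
      H.get? ((mol.drop i).take (j - i)) = some reps ∧ rep ∈ reps ∧
      y = mol.take i ++ rep ++ mol.drop j := by
  rw [pvNbrs_eq_flat] at h
  unfold pvNbrsFlat at h
  rcases List.mem_flatMap.1 h with ⟨i, hi, h2⟩
  rcases List.mem_flatMap.1 h2 with ⟨j, hj, h3⟩
  rcases List.mem_map.1 h3 with ⟨rep, hrep, hy⟩
  rw [PySem.List.mem_pyRange_one] at hi hj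
  have hi0 : 0 ≤ i := hi.1
  have hj0 : 0 ≤ j := le_trans (by omega) hj.1
  have hilen : i < (mol.length : Int) := hi.2
  have hjlen : j ≤ (mol.length : Int) := by
    have := hj.2; omega
  cases hget : H.get? (PySem.List.slice mol (some i) (some j)) with
  | none => rw [hget] at hrep; simp at hrep
  | some reps =>
    rw [hget] at hrep; simp at hrep
    refine ⟨i.toNat, j.toNat, rep, reps, by omega, by omega, ?_, hrep, ?_⟩
    · rw [show PySem.List.slice mol (some i) (some j)
            = (mol.drop i.toNat).take (j.toNat - i.toNat) from ?_] at hget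
      · exact hget
      · rw [show i = ((i.toNat : ℕ) : Int) by omega, show j = ((j.toNat : ℕ) : Int) by omega]
        exact PySem.List.slice_natCast mol i.toNat j.toNat
    · rw [← hy, PySem.List.slice_to mol hi0, PySem.List.slice_from mol hj0]
lemma pvNbrs_le (hsh_map : List (String × List String))
    (hs : ∀ p ∈ hsh_map, ∀ rep ∈ p.2, rep.toList.length ≤ p.1.toList.length)
    (mol y : List Char) (h : y ∈ pvNbrs (pvDict hsh_map) mol) : y.length ≤ mol.length := by
  rcases pvNbrs_decomp _ _ _ h with ⟨i, j, rep, reps, hij, hjl, hget, hrep, hy⟩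
  rcases pvDict_get?_mem _ _ _ hget with ⟨p, hp, hk, hv⟩
  have hkl : p.1.toList.length = j - i := by
    rw [hk]; simp; omega
  rcases List.mem_map.1 (hv ▸ hrep) with ⟨r0, hr0, hr0e⟩
  have := hs p hp r0 hr0
  rw [hr0e, hkl] at this
  subst hy; simp; omega
lemma pvNbrs_chars (hsh_map : List (String × List String)) (mol y : List Char)
    (h : y ∈ pvNbrs (pvDict hsh_map) mol) :
    ∀ c ∈ y, c ∈ mol ∨ c ∈ hsh_map.flatMap (fun p => p.2.flatMap String.toList) := by
  rcases pvNbrs_decomp _ _ _ h with ⟨i, j, rep, reps, hij, hjl, hget, hrep, hy⟩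
  rcases pvDict_get?_mem _ _ _ hget with ⟨p, hp, hk, hv⟩
  rcases List.mem_map.1 (hv ▸ hrep) with ⟨r0, hr0, hr0e⟩
  intro c hc
  subst hy
  rcases List.mem_append.1 hc with hc | hc
  · rcases List.mem_append.1 hc with hc | hc
    · exact Or.inl (List.mem_of_mem_take hc)
    · refine Or.inr (List.mem_flatMap.2 ⟨p, hp, List.mem_flatMap.2 ⟨r0, hr0, ?_⟩⟩)
      rw [hr0e]; exact hc
  · exact Or.inl (List.mem_of_mem_drop hc)
-- derivation lemmas
lemma pvDer_zero {H : PySem.Dict (List Char) (List (List Char))} {a b : List Char}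
    (h : pvDer H a b 0) : a = b := by cases h; rfl
lemma pvDer_snoc {H : PySem.Dict (List Char) (List (List Char))} {a b y : List Char} {n : ℕ}
    (h : pvDer H a b n) (hy : y ∈ pvNbrs H b) : pvDer H a y (n + 1) := by
  induction h with
  | refl x => exact pvDer.step y hy (pvDer.refl y)
  | step w hw h2 ih => exact pvDer.step w hw (ih hy)
lemma pvDer_snoc_iff {H : PySem.Dict (List Char) (List (List Char))} {a c : List Char} {n : ℕ} :
    pvDer H a c (n + 1) ↔ ∃ b, pvDer H a b n ∧ c ∈ pvNbrs H b := by
  constructor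
  · induction n generalizing a with
    | zero =>
      intro h
      cases h with
      | step y hy h2 => exact ⟨a, pvDer.refl a, pvDer_zero h2 ▸ hy⟩
    | succ n ih =>
      intro h
      cases h with
      | step y hy h2 =>
        rcases ih h2 with ⟨b, hb, hc⟩
        exact ⟨b, pvDer.step y hy hb, hc⟩
  · rintro ⟨b, hb, hc⟩
    exact pvDer_snoc hb hc
lemma pvDer_le (hsh_map : List (String × List String))
    (hs : ∀ p ∈ hsh_map, ∀ rep ∈ p.2, rep.toList.length ≤ p.1.toList.length)
    {x y : List Char} {n : ℕ} (h : pvDer (pvDict hsh_map) x y n) : y.length ≤ x.length := by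
  induction h with
  | refl x => exact le_refl _
  | step w hw h2 ih =>
    have := pvNbrs_le hsh_map hs _ _ hw
    omega
lemma pvDer_chars (hsh_map : List (String × List String)) {x y : List Char} {n : ℕ}
    (h : pvDer (pvDict hsh_map) x y n) :
    ∀ c ∈ y, c ∈ x ∨ c ∈ hsh_map.flatMap (fun p => p.2.flatMap String.toList) := by
  induction h with
  | refl x => exact fun c hc => Or.inl hc
  | step w hw h2 ih =>
    intro c hc
    rcases ih c hc with hc2 | hc2
    · exact pvNbrs_chars hsh_map _ _ hw c hc2
    · exact Or.inr hc2
lemma pvExistsMin (P : ℕ → Prop) (n : ℕ) (h : P n) : ∃ k, P k ∧ ∀ j < k, ¬ P j := by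
  classical
  exact ⟨Nat.find ⟨n, h⟩, Nat.find_spec ⟨n, h⟩, fun j hj => Nat.find_min ⟨n, h⟩ hj⟩

-- the finite universe of strings over an alphabet, for the termination measure
def pvAllL (A : Finset Char) : ℕ → Finset (List Char)
  | 0 => {[]}
  | n + 1 => insert [] ((A ×ˢ pvAllL A n).image (fun p => p.1 :: p.2))

lemma mem_pvAllL (A : Finset Char) (n : ℕ) (l : List Char) :
    l ∈ pvAllL A n ↔ l.length ≤ n ∧ ∀ c ∈ l, c ∈ A := by
  induction n generalizing l with
  | zero =>
    cases l <;> simp [pvAllL]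
  | succ n ih =>
    cases l with
    | nil => simp [pvAllL]
    | cons c t =>
      simp only [pvAllL, Finset.mem_insert, Finset.mem_image, Finset.mem_product]
      constructor
      · rintro (h | ⟨⟨c2, t2⟩, ⟨hc2, ht2⟩, he⟩)
        · cases h
        · injection he with h1 h2; subst h1; subst h2
          rcases (ih t2).1 ht2 with ⟨hl, hc⟩
          exact ⟨by simpa using Nat.succ_le_succ hl, by
            intro d hd
            rcases List.mem_cons.1 hd with hd | hd
            · exact hd ▸ hc2
            · exact hc d hd⟩
      · rintro ⟨hl, hc⟩
        refine Or.inr ⟨(c, t), ⟨hc c (by simp), (ih t).2 ⟨by simpa using hl, fun d hd => hc d (by simp [hd])⟩⟩, rfl⟩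
lemma card_pvAllL (A : Finset Char) (n : ℕ) : (pvAllL A n).card ≤ (A.card + 1) ^ (n + 1) := by
  induction n with
  | zero => simp [pvAllL]
  | succ n ih =>
    have h1 : (pvAllL A (n + 1)).card ≤ ((A ×ˢ pvAllL A n).image (fun p => p.1 :: p.2)).card + 1 :=
      Finset.card_insert_le _ _
    have h2 : ((A ×ˢ pvAllL A n).image (fun p => p.1 :: p.2)).card ≤ A.card * (pvAllL A n).card := by
      calc _ ≤ (A ×ˢ pvAllL A n).card := Finset.card_image_le
        _ = A.card * (pvAllL A n).card := Finset.card_product _ _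
    have hp : 1 ≤ (A.card + 1) ^ (n + 1) := Nat.one_le_pow _ _ (by omega)
    calc (pvAllL A (n + 1)).card ≤ A.card * (pvAllL A n).card + 1 := by omega
      _ ≤ A.card * (A.card + 1) ^ (n + 1) + 1 := by
          have := Nat.mul_le_mul_left A.card ih; omega
      _ ≤ (A.card + 1) ^ (n + 1 + 1) := by
          nlinarith [hp, pow_succ (A.card + 1) (n + 1)]
lemma pvMinEntry_mem (x : Int × Int × List Char) (xs : List (Int × Int × List Char)) :
    pvMinEntry x xs ∈ x :: xs := by
  unfold pvMinEntry
  induction xs generalizing x with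
  | nil => simp
  | cons e rest ih =>
    simp only [List.foldl_cons]
    by_cases hlt : pvEntryLt e x
    · rw [if_pos hlt]
      rcases List.mem_cons.1 (ih e) with h | h
      · simp [h]
      · simp [h]
    · rw [if_neg hlt]
      rcases List.mem_cons.1 (ih x) with h | h
      · simp [h]
      · simp [h]
-- ===== A-side invariants =====
def pvSound (H : PySem.Dict (List Char) (List (List Char))) (mol0 : List Char)
    (q : List (Int × Int × List Char)) : Prop :=
  ∀ e ∈ q, ∃ n : ℕ, e.2.1 = (n : Int) ∧ pvDer H mol0 e.2.2 n ∧ e.1 = (e.2.2.length : Int)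

def pvSeenInv (H : PySem.Dict (List Char) (List (List Char))) (mol0 : List Char)
    (seen : PySem.Dict (List Char) Int) : Prop :=
  ∀ x v, seen.get? x = some v → ∃ n : ℕ, v = (n : Int) ∧ 1 ≤ n ∧ pvDer H mol0 x n

-- the completeness trichotomy, with one possibly-broken binding excluded (x₀,v₀)
def pvTriX (H : PySem.Dict (List Char) (List (List Char)))
    (q : List (Int × Int × List Char)) (seen : PySem.Dict (List Char) Int) (m : Int)
    (ex : Option (List Char × Int)) : Prop :=
  ∀ x v, seen.get? x = some v → ex ≠ some (x, v) →
    ((x.length : Int), v, x) ∈ q ∨ (x = ['e'] ∧ m ≤ v) ∨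
    (x ≠ ['e'] ∧ ∀ y ∈ pvNbrs H x, m ≤ v + 1 ∨ ∃ u, seen.get? y = some u ∧ u ≤ v + 1)

def pvPhi (U : Finset (List Char)) (q : List (Int × Int × List Char))
    (seen : PySem.Dict (List Char) Int) : ℕ :=
  q.length + 2 * ∑ x ∈ U, (seen.getD x (10 ^ 12 : Int)).toNat

lemma pvDer_succ_inv {H : PySem.Dict (List Char) (List (List Char))} {a c : List Char} {n : ℕ}
    (h : pvDer H a c (n + 1)) : ∃ y, y ∈ pvNbrs H a ∧ pvDer H y c n := by
  cases h with
  | step y hy h2 => exact ⟨y, hy, h2⟩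

lemma pvLoop_cons (H : PySem.Dict (List Char) (List (List Char))) (fuel : Nat)
    (x : Int × Int × List Char) (xs : List (Int × Int × List Char))
    (seen : PySem.Dict (List Char) Int) (m : Int) :
    pvLoop H (fuel + 1) (x :: xs) seen m =
      if (pvMinEntry x xs).2.2 = ['e'] then
        pvLoop H fuel ((x :: xs).erase (pvMinEntry x xs)) seen (min m (pvMinEntry x xs).2.1)
      else
        pvLoop H fuel
          (pvExpand H m (pvMinEntry x xs).2.1 (pvMinEntry x xs).2.2
            ((x :: xs).erase (pvMinEntry x xs), seen)).1
          (pvExpand H m (pvMinEntry x xs).2.1 (pvMinEntry x xs).2.2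
            ((x :: xs).erase (pvMinEntry x xs), seen)).2 m := rfl

lemma pvPush_spec (m s : Int) (st : List (Int × Int × List Char) × PySem.Dict (List Char) Int)
    (y : List Char) :
    (pvPush m s st y = st ∧ (m ≤ s + 1 ∨ ∃ t, st.2.get? y = some t ∧ t ≤ s + 1)) ∨
    (pvPush m s st y = (st.1 ++ [((y.length : Int), s + 1, y)], st.2.insert y (s + 1)) ∧
      ¬ m ≤ s + 1 ∧ (st.2.get? y = none ∨ ∃ t, st.2.get? y = some t ∧ s + 1 < t)) := by
  unfold pvPush
  by_cases h1 : m ≤ s + 1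
  · exact Or.inl ⟨by simp [h1], Or.inl h1⟩
  · cases h2 : st.2.get? y with
    | none => exact Or.inr ⟨by simp [h1, h2], h1, Or.inl rfl⟩
    | some t =>
      by_cases h3 : t ≤ s + 1
      · exact Or.inl ⟨by simp [h1, h2, h3], Or.inr ⟨t, rfl, h3⟩⟩
      · exact Or.inr ⟨by simp [h1, h2, h3], h1, Or.inr ⟨t, rfl, by omega⟩⟩

lemma pvPhi_push_lt (U : Finset (List Char)) (q : List (Int × Int × List Char))
    (seen : PySem.Dict (List Char) Int) (eentry : Int × Int × List Char) (y : List Char) (v : Int)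
    (hy : y ∈ U) (hlt : v.toNat < (seen.getD y (10 ^ 12 : Int)).toNat) :
    pvPhi U (q ++ [eentry]) (seen.insert y v) < pvPhi U q seen := by
  unfold pvPhi
  have hupd : (fun x => ((seen.insert y v).getD x (10 ^ 12 : Int)).toNat)
      = Function.update (fun x => (seen.getD x (10 ^ 12 : Int)).toNat) y v.toNat := by
    funext x
    rw [PySem.Dict.getD_insert]
    by_cases hx : x = y
    · subst hx; simp [Function.update]
    · simp [Function.update, hx]
  have h1 : ∑ x ∈ U, ((seen.insert y v).getD x (10 ^ 12 : Int)).toNat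
      = v.toNat + ∑ x ∈ U \ {y}, (seen.getD x (10 ^ 12 : Int)).toNat := by
    rw [show (∑ x ∈ U, ((seen.insert y v).getD x (10 ^ 12 : Int)).toNat)
        = ∑ x ∈ U, Function.update (fun x => (seen.getD x (10 ^ 12 : Int)).toNat) y v.toNat x from by
      rw [← hupd]]
    exact Finset.sum_update_of_mem hy _ _
  have h2 : ∑ x ∈ U, (seen.getD x (10 ^ 12 : Int)).toNat
      = (∑ x ∈ U \ {y}, (seen.getD x (10 ^ 12 : Int)).toNat) + (seen.getD y (10 ^ 12 : Int)).toNat := by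
    have := Finset.sum_eq_sum_diff_singleton_add hy (fun x => (seen.getD x (10 ^ 12 : Int)).toNat)
    omega
  simp only [List.length_append, List.length_singleton]
  omega

def pvPack (H : PySem.Dict (List Char) (List (List Char))) (mol0 : List Char)
    (q : List (Int × Int × List Char)) (seen : PySem.Dict (List Char) Int) (m : Int) : Prop :=
  pvSound H mol0 q ∧ pvSeenInv H mol0 seen ∧ pvTriX H q seen m none

lemma pvFold_inv (hsh_map : List (String × List String)) (mol0 : List Char)
    (hs : ∀ p ∈ hsh_map, ∀ rep ∈ p.2, rep.toList.length ≤ p.1.toList.length)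
    (m s : Int) (hm : m ≤ 10 ^ 12) (ns : ℕ) (hsn : s = (ns : Int)) (mol : List Char)
    (hder : pvDer (pvDict hsh_map) mol0 mol ns) (hmole : mol ≠ ['e']) :
    ∀ (ys : List (List Char)) (q : List (Int × Int × List Char)) (seen : PySem.Dict (List Char) Int),
      (∀ y ∈ ys, y ∈ pvNbrs (pvDict hsh_map) mol) →
      pvSound (pvDict hsh_map) mol0 q → pvSeenInv (pvDict hsh_map) mol0 seen →
      pvTriX (pvDict hsh_map) q seen m (some (mol, s)) →
      pvSound (pvDict hsh_map) mol0 (ys.foldl (pvPush m s) (q, seen)).1 ∧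
      pvSeenInv (pvDict hsh_map) mol0 (ys.foldl (pvPush m s) (q, seen)).2 ∧
      pvTriX (pvDict hsh_map) (ys.foldl (pvPush m s) (q, seen)).1
        (ys.foldl (pvPush m s) (q, seen)).2 m (some (mol, s)) ∧
      (∀ a ∈ q, a ∈ (ys.foldl (pvPush m s) (q, seen)).1) ∧
      (∀ x v0, seen.get? x = some v0 →
        ∃ u, (ys.foldl (pvPush m s) (q, seen)).2.get? x = some u ∧ u ≤ v0) ∧
      (∀ x u, (ys.foldl (pvPush m s) (q, seen)).2.get? x = some u →
        seen.get? x = some u ∨ (u = s + 1 ∧ x ∈ ys)) ∧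
      (∀ y ∈ ys, m ≤ s + 1 ∨
        ∃ u, (ys.foldl (pvPush m s) (q, seen)).2.get? y = some u ∧ u ≤ s + 1) ∧
      pvPhi
        (pvAllL (mol0 ++ hsh_map.flatMap (fun p => p.2.flatMap String.toList)).toFinset mol0.length)
        (ys.foldl (pvPush m s) (q, seen)).1 (ys.foldl (pvPush m s) (q, seen)).2
      ≤ pvPhi
        (pvAllL (mol0 ++ hsh_map.flatMap (fun p => p.2.flatMap String.toList)).toFinset mol0.length)
        q seen := by
  intro ys
  induction ys with
  | nil =>
    intro q seen hys hsound hseen htri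
    refine ⟨hsound, hseen, htri, fun a ha => ha, fun x v0 hx => ⟨v0, hx, le_refl _⟩,
      fun x u hx => Or.inl hx, fun y hy => absurd hy (List.not_mem_nil), le_refl _⟩
  | cons y rest ih =>
    intro q seen hys hsound hseen htri
    have hy : y ∈ pvNbrs (pvDict hsh_map) mol := hys y (by simp)
    have hdy : pvDer (pvDict hsh_map) mol0 y (ns + 1) := pvDer_snoc hder hy
    have hylen : y.length ≤ mol0.length := pvDer_le hsh_map hs hdy
    simp only [List.foldl_cons]
    rcases pvPush_spec m s (q, seen) y with ⟨heq, hside⟩ | ⟨heq, hm1, hold⟩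
    · -- skipped push
      rw [heq]
      obtain ⟨h1, h2, h3, h4, h5, h6, h7, h8⟩ :=
        ih q seen (fun z hz => hys z (by simp [hz])) hsound hseen htri
      refine ⟨h1, h2, h3, h4, h5, ?_, ?_, h8⟩
      · intro x u hx
        rcases h6 x u hx with h | ⟨h, hxr⟩
        · exact Or.inl h
        · exact Or.inr ⟨h, by simp [hxr]⟩
      · intro z hz
        rcases List.mem_cons.1 hz with rfl | hz
        · rcases hside with hside | ⟨t, ht, hts⟩
          · exact Or.inl hside
          · rcases h5 z t ht with ⟨u, hu, huv⟩
            exact Or.inr ⟨u, hu, le_trans huv hts⟩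
        · exact h7 z hz
    · -- pushed
      rw [heq]
      have hseen' : pvSeenInv (pvDict hsh_map) mol0 (seen.insert y (s + 1)) := by
        intro x v hx
        rw [PySem.Dict.get?_insert] at hx
        by_cases hxy : x = y
        · rw [if_pos hxy] at hx
          cases hx
          exact ⟨ns + 1, by push_cast [hsn]; ring, by omega, hxy ▸ hdy⟩
        · rw [if_neg hxy] at hx
          exact hseen x v hx
      have hsound' : pvSound (pvDict hsh_map) mol0 (q ++ [((y.length : Int), s + 1, y)]) := by
        intro a ha
        rcases List.mem_append.1 ha with ha | ha
        · exact hsound a ha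
        · rw [List.mem_singleton] at ha
          subst ha
          exact ⟨ns + 1, by push_cast [hsn]; ring, hdy, rfl⟩
      have htri' : pvTriX (pvDict hsh_map) (q ++ [((y.length : Int), s + 1, y)])
          (seen.insert y (s + 1)) m (some (mol, s)) := by
        intro x v hx hex
        rw [PySem.Dict.get?_insert] at hx
        by_cases hxy : x = y
        · rw [if_pos hxy] at hx
          cases hx
          subst hxy
          exact Or.inl (by simp)
        · rw [if_neg hxy] at hx
          rcases htri x v hx hex with hc | hc | ⟨hne, hc⟩
          · exact Or.inl (List.mem_append.2 (Or.inl hc))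
          · exact Or.inr (Or.inl hc)
          · refine Or.inr (Or.inr ⟨hne, fun z hz => ?_⟩)
            rcases hc z hz with hc2 | ⟨u, hu, huv⟩
            · exact Or.inl hc2
            · by_cases hzy : z = y
              · subst hzy
                refine Or.inr ⟨s + 1, by rw [PySem.Dict.get?_insert, if_pos rfl], ?_⟩
                rcases hold with hnone | ⟨t, ht, hst⟩
                · rw [hnone] at hu; cases hu
                · rw [ht] at hu; cases hu; omega
              · exact Or.inr ⟨u, by rw [PySem.Dict.get?_insert, if_neg hzy]; exact hu, huv⟩
      obtain ⟨h1, h2, h3, h4, h5, h6, h7, h8⟩ :=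
        ih (q ++ [((y.length : Int), s + 1, y)]) (seen.insert y (s + 1))
          (fun z hz => hys z (by simp [hz])) hsound' hseen' htri'
      have hget_y : (seen.insert y (s + 1)).get? y = some (s + 1) := by
        rw [PySem.Dict.get?_insert, if_pos rfl]
      refine ⟨h1, h2, h3, ?_, ?_, ?_, ?_, ?_⟩
      · intro a ha
        exact h4 a (List.mem_append.2 (Or.inl ha))
      · intro x v0 hx
        by_cases hxy : x = y
        · have hv0 : s + 1 < v0 := by
            rw [hxy] at hx
            rcases hold with hnone | ⟨t, ht, hst⟩
            · rw [hnone] at hx; cases hx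
            · rw [ht] at hx; cases hx; exact hst
          rcases h5 y (s + 1) hget_y with ⟨u, hu, huv⟩
          rw [hxy]
          exact ⟨u, hu, by omega⟩
        · rcases h5 x v0 (by rw [PySem.Dict.get?_insert, if_neg hxy]; exact hx) with ⟨u, hu, huv⟩
          exact ⟨u, hu, huv⟩
      · intro x u hx
        rcases h6 x u hx with h | ⟨h, hxr⟩
        · rw [PySem.Dict.get?_insert] at h
          by_cases hxy : x = y
          · rw [if_pos hxy] at h
            cases h
            exact Or.inr ⟨rfl, by simp [hxy]⟩
          · rw [if_neg hxy] at h
            exact Or.inl h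
        · exact Or.inr ⟨h, by simp [hxr]⟩
      · intro z hz
        rcases List.mem_cons.1 hz with rfl | hz
        · rcases h5 z (s + 1) hget_y with ⟨u, hu, huv⟩
          exact Or.inr ⟨u, hu, huv⟩
        · exact h7 z hz
      · refine le_trans h8 (le_of_lt ?_)
        apply pvPhi_push_lt
        · rw [mem_pvAllL]
          refine ⟨hylen, fun c hc => ?_⟩
          rw [List.mem_toFinset]
          rcases pvDer_chars hsh_map hdy c hc with h | h
          · exact List.mem_append.2 (Or.inl h)
          · exact List.mem_append.2 (Or.inr h)
        · rw [PySem.Dict.getD_eq_get?_getD]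
          rcases hold with hnone | ⟨t, ht, hst⟩
          · rw [hnone]
            simp only [Option.getD_none]
            omega
          · rw [ht]
            simp only [Option.getD_some]
            omega

lemma pvPop_e_pack (H : PySem.Dict (List Char) (List (List Char))) (mol0 : List Char)
    (x : Int × Int × List Char) (xs : List (Int × Int × List Char))
    (seen : PySem.Dict (List Char) Int) (m : Int)
    (hpack : pvPack H mol0 (x :: xs) seen m)
    (he : (pvMinEntry x xs).2.2 = ['e'])
    (hlen : (pvMinEntry x xs).1 = ((pvMinEntry x xs).2.2.length : Int)) :
    pvPack H mol0 ((x :: xs).erase (pvMinEntry x xs)) seen (min m (pvMinEntry x xs).2.1) := by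
  obtain ⟨hsound, hseen, htri⟩ := hpack
  refine ⟨fun a ha => hsound a (List.mem_of_mem_erase ha), hseen, ?_⟩
  intro z v hz hex
  rcases htri z v hz (by simp) with hc | hc | ⟨hne, hc⟩
  · by_cases hw : ((z.length : Int), v, z) = pvMinEntry x xs
    · -- popped witness: z = 'e', v = its steps
      have hz2 : z = ['e'] := by rw [← he, ← hw]
      have hv : v = (pvMinEntry x xs).2.1 := by rw [← hw]
      exact Or.inr (Or.inl ⟨hz2, hv ▸ min_le_right _ _⟩)
    · exact Or.inl ((List.mem_erase_of_ne hw).2 hc)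
  · exact Or.inr (Or.inl ⟨hc.1, le_trans (min_le_left _ _) hc.2⟩)
  · refine Or.inr (Or.inr ⟨hne, fun w hw => ?_⟩)
    rcases hc w hw with hc2 | hc2
    · exact Or.inl (le_trans (min_le_left _ _) hc2)
    · exact Or.inr hc2

lemma pvPop_x_pack (hsh_map : List (String × List String)) (mol0 : List Char)
    (hs : ∀ p ∈ hsh_map, ∀ rep ∈ p.2, rep.toList.length ≤ p.1.toList.length)
    (x : Int × Int × List Char) (xs : List (Int × Int × List Char))
    (seen : PySem.Dict (List Char) Int) (m : Int) (hm : m ≤ 10 ^ 12)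
    (hpack : pvPack (pvDict hsh_map) mol0 (x :: xs) seen m)
    (hne : (pvMinEntry x xs).2.2 ≠ ['e'])
    (ns : ℕ) (hsn : (pvMinEntry x xs).2.1 = (ns : Int))
    (hder : pvDer (pvDict hsh_map) mol0 (pvMinEntry x xs).2.2 ns)
    (hlen : (pvMinEntry x xs).1 = ((pvMinEntry x xs).2.2.length : Int)) :
    pvPack (pvDict hsh_map) mol0
      ((pvNbrs (pvDict hsh_map) (pvMinEntry x xs).2.2).foldl (pvPush m (pvMinEntry x xs).2.1)
        ((x :: xs).erase (pvMinEntry x xs), seen)).1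
      ((pvNbrs (pvDict hsh_map) (pvMinEntry x xs).2.2).foldl (pvPush m (pvMinEntry x xs).2.1)
        ((x :: xs).erase (pvMinEntry x xs), seen)).2 m ∧
    (∀ a ∈ (x :: xs).erase (pvMinEntry x xs),
      a ∈ ((pvNbrs (pvDict hsh_map) (pvMinEntry x xs).2.2).foldl (pvPush m (pvMinEntry x xs).2.1)
        ((x :: xs).erase (pvMinEntry x xs), seen)).1) ∧
    (∀ y ∈ pvNbrs (pvDict hsh_map) (pvMinEntry x xs).2.2, m ≤ (pvMinEntry x xs).2.1 + 1 ∨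
      ∃ u, ((pvNbrs (pvDict hsh_map) (pvMinEntry x xs).2.2).foldl (pvPush m (pvMinEntry x xs).2.1)
        ((x :: xs).erase (pvMinEntry x xs), seen)).2.get? y = some u ∧ u ≤ (pvMinEntry x xs).2.1 + 1) ∧
    pvPhi
      (pvAllL (mol0 ++ hsh_map.flatMap (fun p => p.2.flatMap String.toList)).toFinset mol0.length)
      ((pvNbrs (pvDict hsh_map) (pvMinEntry x xs).2.2).foldl (pvPush m (pvMinEntry x xs).2.1)
        ((x :: xs).erase (pvMinEntry x xs), seen)).1
      ((pvNbrs (pvDict hsh_map) (pvMinEntry x xs).2.2).foldl (pvPush m (pvMinEntry x xs).2.1)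
        ((x :: xs).erase (pvMinEntry x xs), seen)).2
    ≤ pvPhi
      (pvAllL (mol0 ++ hsh_map.flatMap (fun p => p.2.flatMap String.toList)).toFinset mol0.length)
      ((x :: xs).erase (pvMinEntry x xs)) seen := by
  obtain ⟨hsound, hseen, htri⟩ := hpack
  set e0 := pvMinEntry x xs with he0
  set mol := e0.2.2 with hmol
  set s := e0.2.1 with hsdef
  have htriX : pvTriX (pvDict hsh_map) ((x :: xs).erase e0) seen m (some (mol, s)) := by
    intro z v hz hex
    rcases htri z v hz (by simp) with hc | hc | ⟨hne2, hc⟩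
    · by_cases hw : ((z.length : Int), v, z) = e0
      · exfalso
        apply hex
        have hz2 : z = mol := by rw [hmol, ← hw]
        have hv : v = s := by rw [hsdef, ← hw]
        rw [hz2, hv]
      · exact Or.inl ((List.mem_erase_of_ne hw).2 hc)
    · exact Or.inr (Or.inl hc)
    · exact Or.inr (Or.inr ⟨hne2, hc⟩)
  obtain ⟨h1, h2, h3, h4, h5, h6, h7, h8⟩ :=
    pvFold_inv hsh_map mol0 hs m s hm ns hsn mol hder hne
      (pvNbrs (pvDict hsh_map) mol) ((x :: xs).erase e0) seen
      (fun y hy => hy) (fun a ha => hsound a (List.mem_of_mem_erase ha)) hseen htriX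
  refine ⟨⟨h1, h2, ?_⟩, h4, h7, h8⟩
  intro z v hz _
  by_cases hex : z = mol ∧ v = s
  · obtain ⟨rfl, rfl⟩ := hex
    refine Or.inr (Or.inr ⟨hne, fun w hw => ?_⟩)
    exact h7 w hw
  · exact h3 z v hz (fun hc => hex (by cases hc; exact ⟨rfl, rfl⟩))

lemma pvLoop_mono (H : PySem.Dict (List Char) (List (List Char))) (fuel : Nat)
    (q : List (Int × Int × List Char)) (seen : PySem.Dict (List Char) Int) (m : Int) :
    pvLoop H fuel q seen m ≤ m := by
  induction fuel generalizing q seen m with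
  | zero => exact le_refl _
  | succ fuel ih =>
    cases q with
    | nil => exact le_refl _
    | cons x xs =>
      rw [pvLoop_cons]
      split_ifs with he
      · exact le_trans (ih _ _ _) (min_le_left _ _)
      · exact ih _ _ _

lemma pvFold_sound (hsh_map : List (String × List String)) (mol0 : List Char)
    (m s : Int) (ns : ℕ) (hsn : s = (ns : Int)) (mol : List Char)
    (hder : pvDer (pvDict hsh_map) mol0 mol ns) :
    ∀ (ys : List (List Char)) (q : List (Int × Int × List Char)) (seen : PySem.Dict (List Char) Int),
      (∀ y ∈ ys, y ∈ pvNbrs (pvDict hsh_map) mol) →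
      pvSound (pvDict hsh_map) mol0 q →
      pvSound (pvDict hsh_map) mol0 (ys.foldl (pvPush m s) (q, seen)).1 := by
  intro ys
  induction ys with
  | nil => intro q seen _ hq; exact hq
  | cons y rest ih =>
    intro q seen hys hq
    simp only [List.foldl_cons]
    rcases pvPush_spec m s (q, seen) y with ⟨heq, _⟩ | ⟨heq, _, _⟩ <;> rw [heq]
    · exact ih q seen (fun z hz => hys z (by simp [hz])) hq
    · refine ih _ _ (fun z hz => hys z (by simp [hz])) ?_
      intro a ha
      rcases List.mem_append.1 ha with ha | ha
      · exact hq a ha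
      · rw [List.mem_singleton] at ha
        subst ha
        exact ⟨ns + 1, by push_cast [hsn]; ring, pvDer_snoc hder (hys y (by simp)), rfl⟩

lemma pvLoop_lower (hsh_map : List (String × List String)) (mol0 : List Char) (fuel : Nat)
    (q : List (Int × Int × List Char)) (seen : PySem.Dict (List Char) Int) (m : Int)
    (hm : m = 10 ^ 12 ∨ ∃ n : ℕ, pvDer (pvDict hsh_map) mol0 ['e'] n ∧ m = (n : Int))
    (hq : pvSound (pvDict hsh_map) mol0 q) :
    pvLoop (pvDict hsh_map) fuel q seen m = 10 ^ 12 ∨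
      ∃ n : ℕ, pvDer (pvDict hsh_map) mol0 ['e'] n ∧ pvLoop (pvDict hsh_map) fuel q seen m = (n : Int) := by
  induction fuel generalizing q seen m with
  | zero => exact hm
  | succ fuel ih =>
    cases q with
    | nil => exact hm
    | cons x xs =>
      rw [pvLoop_cons]
      have he0m := pvMinEntry_mem x xs
      rcases hq _ he0m with ⟨ns, hsn, hder, hlen⟩
      split_ifs with he
      · refine ih _ _ _ ?_ (fun a ha => hq a (List.mem_of_mem_erase ha))
        rcases min_cases m (pvMinEntry x xs).2.1 with ⟨hmin, _⟩ | ⟨hmin, _⟩ <;> rw [hmin]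
        · exact hm
        · exact Or.inr ⟨ns, he ▸ hder, hsn⟩
      · rw [pvExpand_eq_fold]
        refine ih _ _ _ hm ?_
        exact pvFold_sound hsh_map mol0 m _ ns hsn _ hder _ _ seen (fun y hy => hy)
          (fun a ha => hq a (List.mem_of_mem_erase ha))

lemma pvLoop_upper (hsh_map : List (String × List String)) (mol0 : List Char)
    (hs : ∀ p ∈ hsh_map, ∀ rep ∈ p.2, rep.toList.length ≤ p.1.toList.length)
    (n : ℕ) :
    ∀ (fuel : Nat) (q : List (Int × Int × List Char)) (seen : PySem.Dict (List Char) Int) (m : Int),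
      m ≤ 10 ^ 12 →
      pvPhi
          (pvAllL (mol0 ++ hsh_map.flatMap (fun p => p.2.flatMap String.toList)).toFinset mol0.length)
          q seen < fuel →
      pvSound (pvDict hsh_map) mol0 q → pvSeenInv (pvDict hsh_map) mol0 seen →
      pvTriX (pvDict hsh_map) q seen m none →
      (∀ e ∈ q, pvDer (pvDict hsh_map) e.2.2 ['e'] n →
          pvLoop (pvDict hsh_map) fuel q seen m ≤ e.2.1 + (n : Int)) ∧
      (∀ x v, seen.get? x = some v → pvDer (pvDict hsh_map) x ['e'] n →
          pvLoop (pvDict hsh_map) fuel q seen m ≤ v + (n : Int)) := by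
  induction n using Nat.strong_induction_on with
  | _ n IHn =>
    intro fuel
    induction fuel with
    | zero =>
      intro q seen m hm hphi _ _ _
      exact absurd hphi (by omega)
    | succ fuel IHf =>
      intro q seen m hm hphi hsound hseen htri
      have hn0 : (0 : Int) ≤ (n : Int) := Int.natCast_nonneg n
      have ha : ∀ e ∈ q, pvDer (pvDict hsh_map) e.2.2 ['e'] n →
          pvLoop (pvDict hsh_map) (fuel + 1) q seen m ≤ e.2.1 + (n : Int) := by
        intro e he hder
        cases q with
        | nil => cases he
        | cons x xs =>
          rw [pvLoop_cons]
          have he0m := pvMinEntry_mem x xs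
          rcases hsound _ he0m with ⟨ns, hsn, hder0, hlen0⟩
          have hphi' : pvPhi
              (pvAllL (mol0 ++ hsh_map.flatMap (fun p => p.2.flatMap String.toList)).toFinset mol0.length)
              ((x :: xs).erase (pvMinEntry x xs)) seen < fuel := by
            unfold pvPhi at hphi ⊢
            rw [List.length_erase_of_mem he0m]
            have hx : 0 < (x :: xs).length := by simp
            omega
          split_ifs with hise
          · -- the popped entry is 'e'
            obtain ⟨hs1, hs2, hs3⟩ := pvPop_e_pack (pvDict hsh_map) mol0 x xs seen m
              ⟨hsound, hseen, htri⟩ hise hlen0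
            have hm' : min m (pvMinEntry x xs).2.1 ≤ 10 ^ 12 :=
              le_trans (min_le_left _ _) hm
            by_cases hsurv : e ∈ (x :: xs).erase (pvMinEntry x xs)
            · exact (IHf _ _ _ hm' hphi' hs1 hs2 hs3).1 e hsurv hder
            · have hee : e = pvMinEntry x xs := by
                by_contra hne2
                exact hsurv ((List.mem_erase_of_ne hne2).2 he)
              refine le_trans (pvLoop_mono _ _ _ _ _) ?_
              rw [hee]
              have := min_le_right m (pvMinEntry x xs).2.1
              omega
          · -- the popped entry is expanded
            rw [pvExpand_eq_fold]
            obtain ⟨⟨hs1, hs2, hs3⟩, hrest, hnfacts, hphif⟩ :=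
              pvPop_x_pack hsh_map mol0 hs x xs seen m hm ⟨hsound, hseen, htri⟩ hise ns hsn hder0 hlen0
            have hphi'' := lt_of_le_of_lt hphif hphi'
            by_cases hsurv : e ∈ (x :: xs).erase (pvMinEntry x xs)
            · exact (IHf _ _ _ hm hphi'' hs1 hs2 hs3).1 e (hrest e hsurv) hder
            · have hee : e = pvMinEntry x xs := by
                by_contra hne2
                exact hsurv ((List.mem_erase_of_ne hne2).2 he)
              rw [hee] at hder
              cases n with
              | zero => exact absurd (pvDer_zero hder) hise
              | succ n' =>
                obtain ⟨y, hy, hder'⟩ := pvDer_succ_inv hder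
                rcases hnfacts y hy with hc | ⟨u, hu, huv⟩
                · refine le_trans (pvLoop_mono _ _ _ _ _) ?_
                  rw [hee]
                  push_cast
                  omega
                · have hb' := (IHn n' (by omega) fuel _ _ _ hm hphi'' hs1 hs2 hs3).2 y u hu hder'
                  refine le_trans hb' ?_
                  rw [hee]
                  push_cast
                  omega
      refine ⟨ha, ?_⟩
      intro z v hzv hder
      rcases htri z v hzv (by simp) with hc | ⟨hz, hmv⟩ | ⟨hnez, hc⟩
      · exact ha _ hc hder
      · exact le_trans (pvLoop_mono _ _ _ _ _) (by omega)
      · cases n with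
        | zero => exact absurd (pvDer_zero hder) hnez
        | succ n' =>
          obtain ⟨y, hy, hder'⟩ := pvDer_succ_inv hder
          rcases hc y hy with hc2 | ⟨u, hu, huv⟩
          · refine le_trans (pvLoop_mono _ _ _ _ _) ?_
            push_cast
            omega
          · have hb' := (IHn n' (by omega) (fuel + 1) q seen m hm hphi hsound hseen htri).2 y u hu hder'
            refine le_trans hb' ?_
            push_cast
            omega

-- ===== B-side invariants =====
lemma pvStep_none_iff (H : PySem.Dict (List Char) (List (List Char)))
    (fr new : List (List Char)) (vis : PySem.Set (List Char)) :
    pvStep H fr new vis = none ↔ ['e'] ∈ fr := by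
  induction fr generalizing new vis with
  | nil => simp [pvStep]
  | cons mol rest ih =>
    by_cases hm : mol = ['e']
    · subst hm; simp [pvStep]
    · simp only [pvStep, if_neg hm]
      rw [ih]
      simp only [List.mem_cons]
      constructor
      · exact fun h => Or.inr h
      · rintro (h | h)
        · exact absurd h.symm hm
        · exact h

lemma pvStepInner (H : PySem.Dict (List Char) (List (List Char))) (nbs : List (List Char)) :
    ∀ (new : List (List Char)) (vis : PySem.Set (List Char)),
      (∀ x, x ∈ (nbs.foldl (fun (st : List (List Char) × PySem.Set (List Char)) nb =>
          if nb ∈ st.2 then st else (st.1 ++ [nb], st.2.add nb)) (new, vis)).2 ↔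
        x ∈ vis ∨ x ∈ nbs) ∧
      (∀ x, x ∈ (nbs.foldl (fun (st : List (List Char) × PySem.Set (List Char)) nb =>
          if nb ∈ st.2 then st else (st.1 ++ [nb], st.2.add nb)) (new, vis)).1 ↔
        x ∈ new ∨ (x ∈ nbs ∧ x ∉ vis)) := by
  induction nbs with
  | nil => intro new vis; simp
  | cons nb rest ih =>
    intro new vis
    simp only [List.foldl_cons]
    by_cases hm : nb ∈ vis
    · rw [if_pos hm]
      constructor
      · intro x
        rw [(ih new vis).1 x, List.mem_cons]
        constructor
        · rintro (h | h)
          · exact Or.inl h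
          · exact Or.inr (Or.inr h)
        · rintro (h | h | h)
          · exact Or.inl h
          · exact Or.inl (h ▸ hm)
          · exact Or.inr h
      · intro x
        rw [(ih new vis).2 x, List.mem_cons]
        constructor
        · rintro (h | ⟨h1, h2⟩)
          · exact Or.inl h
          · exact Or.inr ⟨Or.inr h1, h2⟩
        · rintro (h | ⟨h1 | h1, h2⟩)
          · exact Or.inl h
          · exact absurd (h1 ▸ hm) h2
          · exact Or.inr ⟨h1, h2⟩
    · rw [if_neg hm]
      constructor
      · intro x
        rw [(ih (new ++ [nb]) (vis.add nb)).1 x, PySem.Set.mem_add, List.mem_cons]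
        constructor
        · rintro ((h | h) | h)
          · exact Or.inl h
          · exact Or.inr (Or.inl h)
          · exact Or.inr (Or.inr h)
        · rintro (h | h | h)
          · exact Or.inl (Or.inl h)
          · exact Or.inl (Or.inr h)
          · exact Or.inr h
      · intro x
        rw [(ih (new ++ [nb]) (vis.add nb)).2 x]
        simp only [List.mem_append, List.mem_cons, List.not_mem_nil, or_false, List.mem_cons]
        constructor
        · rintro ((h | h) | ⟨h1, h2⟩)
          · exact Or.inl h
          · exact Or.inr ⟨Or.inl h, h ▸ hm⟩
          · refine Or.inr ⟨Or.inr h1, fun hx => h2 (PySem.Set.mem_add vis nb x |>.2 (Or.inl hx))⟩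
        · rintro (h | ⟨h1 | h1, h2⟩)
          · exact Or.inl (Or.inl h)
          · exact Or.inl (Or.inr h1)
          · by_cases hx : x = nb
            · exact Or.inl (Or.inr hx)
            · refine Or.inr ⟨h1, fun hx2 => ?_⟩
              rcases (PySem.Set.mem_add vis nb x).1 hx2 with h | h
              · exact h2 h
              · exact hx h

lemma pvStep_some_spec (H : PySem.Dict (List Char) (List (List Char)))
    (fr : List (List Char)) : ∀ (new : List (List Char)) (vis : PySem.Set (List Char)),
    ['e'] ∉ fr →
    ∀ (nf : List (List Char)) (vis' : PySem.Set (List Char)),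
    pvStep H fr new vis = some (nf, vis') →
    (∀ x, x ∈ vis' ↔ x ∈ vis ∨ (∃ mol ∈ fr, x ∈ pvNbrs H mol)) ∧
    (∀ x, x ∈ nf ↔ x ∈ new ∨ ((∃ mol ∈ fr, x ∈ pvNbrs H mol) ∧ x ∉ vis)) := by
  induction fr with
  | nil =>
    intro new vis he nf vis' h
    simp only [pvStep, Option.some.injEq, Prod.mk.injEq] at h
    obtain ⟨rfl, rfl⟩ := h
    simp
  | cons mol rest ih =>
    intro new vis he nf vis' h
    have hmol : mol ≠ ['e'] := fun hx => he (by simp [hx])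
    simp only [pvStep, if_neg hmol] at h
    have hrest : ['e'] ∉ rest := fun hx => he (by simp [hx])
    have hinner := pvStepInner H (pvNbrs H mol) new vis
    have hih := ih _ _ hrest _ _ h
    constructor
    · intro x
      rw [(hih.1 x), (hinner.1 x)]
      constructor
      · rintro ((h1 | h1) | ⟨m, hm, hx⟩)
        · exact Or.inl h1
        · exact Or.inr ⟨mol, by simp, h1⟩
        · exact Or.inr ⟨m, by simp [hm], hx⟩
      · rintro (h1 | ⟨m, hm, hx⟩)
        · exact Or.inl (Or.inl h1)
        · rcases List.mem_cons.1 hm with rfl | hm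
          · exact Or.inl (Or.inr hx)
          · exact Or.inr ⟨m, hm, hx⟩
    · intro x
      rw [(hih.2 x), (hinner.2 x)]
      have hv := hinner.1 x
      constructor
      · rintro ((h1 | ⟨h1, h2⟩) | ⟨⟨m, hm, hx⟩, h2⟩)
        · exact Or.inl h1
        · exact Or.inr ⟨⟨mol, by simp, h1⟩, h2⟩
        · have h2' : x ∉ vis := fun hx2 => h2 (hv.2 (Or.inl hx2))
          exact Or.inr ⟨⟨m, by simp [hm], hx⟩, h2'⟩
      · rintro (h1 | ⟨⟨m, hm, hx⟩, h2⟩)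
        · exact Or.inl (Or.inl h1)
        · rcases List.mem_cons.1 hm with rfl | hm
          · exact Or.inl (Or.inr ⟨hx, h2⟩)
          · by_cases hb : x ∈ vis ∨ x ∈ pvNbrs H mol
            · rcases hb with hb | hb
              · exact absurd hb h2
              · exact Or.inl (Or.inr ⟨hb, h2⟩)
            · exact Or.inr ⟨⟨m, hm, hx⟩, fun hx2 => hb (hv.1 hx2)⟩

lemma pvBfs_empty (H : PySem.Dict (List Char) (List (List Char))) (k : Nat) (s : Int)
    (vis : PySem.Set (List Char)) : pvBfs H k s [] vis = 10 ^ 12 := by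
  cases k with
  | zero => rfl
  | succ k => simp [pvBfs]

-- one guarded unfolding of pvBfs (avoids simp recursing through a literal fuel)
lemma pvBfs_succ (H : PySem.Dict (List Char) (List (List Char))) (k : Nat) (steps : Int)
    (fr : List (List Char)) (vis : PySem.Set (List Char))
    (h1 : fr ≠ []) (h2 : ¬ (10 ^ 12 : Int) ≤ steps) :
    pvBfs H (k + 1) steps fr vis =
      match pvStep H fr [] vis with
      | none => steps
      | some (nf, vis') => pvBfs H k (steps + 1) nf vis' := by
  simp only [pvBfs]
  rw [if_neg (fun h => h.elim h1 h2)]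

-- BFS exhaustion: if no molecule has minimal depth `steps`, everything derivable is
-- derivable in fewer than `steps` rewrites
lemma pvBfs_exhaust (H : PySem.Dict (List Char) (List (List Char))) (mol0 : List Char)
    (steps : ℕ)
    (hfr : ∀ x, ¬ (pvDer H mol0 x steps ∧ ∀ j < steps, ¬ pvDer H mol0 x j)) :
    ∀ (n : ℕ) (x : List Char), pvDer H mol0 x n → ∃ j, j < steps ∧ pvDer H mol0 x j := by
  intro n
  induction n using Nat.strong_induction_on with
  | _ n ih =>
    intro x hx
    obtain ⟨n0, hd0, hmin⟩ := pvExistsMin (fun j => pvDer H mol0 x j) n hx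
    have hn0n : n0 ≤ n := by
      by_contra hgt
      push_neg at hgt
      exact hmin n hgt hx
    rcases lt_trichotomy n0 steps with hlt | heq | hgt
    · exact ⟨n0, hlt, hd0⟩
    · exact absurd ⟨by rwa [heq] at hd0, fun j hj => hmin j (by omega)⟩ (hfr x)
    · exfalso
      cases n0 with
      | zero => omega
      | succ m =>
        obtain ⟨b, hb, hxb⟩ := pvDer_snoc_iff.1 hd0
        obtain ⟨jb, hjb, hdb⟩ := ih m (by omega) b hb
        exact hmin (jb + 1) (by omega) (pvDer_snoc hdb hxb)

lemma pvBfs_correct (H : PySem.Dict (List Char) (List (List Char))) (mol0 : List Char) :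
    ∀ (k steps : ℕ) (fr : List (List Char)) (vis : PySem.Set (List Char)),
      10 ^ 12 + 2 ≤ k + steps →
      (∀ x, x ∈ vis ↔ ∃ j ≤ steps, pvDer H mol0 x j) →
      (∀ x, x ∈ fr ↔ pvDer H mol0 x steps ∧ ∀ j < steps, ¬ pvDer H mol0 x j) →
      (∀ j < steps, ¬ pvDer H mol0 ['e'] j) →
      (pvBfs H k (steps : Int) fr vis = 10 ^ 12 ∨
        ∃ n : ℕ, pvDer H mol0 ['e'] n ∧ pvBfs H k (steps : Int) fr vis = (n : Int)) ∧
      (∀ n : ℕ, pvDer H mol0 ['e'] n → pvBfs H k (steps : Int) fr vis ≤ (n : Int)) ∧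
      pvBfs H k (steps : Int) fr vis ≤ 10 ^ 12 := by
  intro k
  induction k with
  | zero =>
    intro steps fr vis hk hvis hfr hne
    refine ⟨Or.inl rfl, ?_, le_refl _⟩
    intro n hn
    have hns : steps ≤ n := by
      by_contra hlt
      push_neg at hlt
      exact hne n hlt hn
    show (10 ^ 12 : Int) ≤ (n : Int)
    omega
  | succ k ih =>
    intro steps fr vis hk hvis hfr hne
    by_cases hfre : fr = []
    · have hres : pvBfs H (k + 1) (steps : Int) fr vis = 10 ^ 12 := by
        simp only [pvBfs]
        rw [if_pos (Or.inl hfre)]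
      rw [hres]
      refine ⟨Or.inl rfl, ?_, le_refl _⟩
      intro n hn
      have hempty : ∀ x, ¬ (pvDer H mol0 x steps ∧ ∀ j < steps, ¬ pvDer H mol0 x j) := by
        intro x hx
        have := (hfr x).2 hx
        rw [hfre] at this
        exact absurd this (List.not_mem_nil)
      obtain ⟨j, hj, hdj⟩ := pvBfs_exhaust H mol0 steps hempty n ['e'] hn
      exact absurd hdj (hne j hj)
    · by_cases hcut : (10 ^ 12 : Int) ≤ (steps : Int)
      · have hres : pvBfs H (k + 1) (steps : Int) fr vis = 10 ^ 12 := by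
          simp only [pvBfs]
          rw [if_pos (Or.inr hcut)]
        rw [hres]
        refine ⟨Or.inl rfl, ?_, le_refl _⟩
        intro n hn
        have hns : steps ≤ n := by
          by_contra hlt
          push_neg at hlt
          exact hne n hlt hn
        omega
      · cases hstep : pvStep H fr [] vis with
        | none =>
          have he := (pvStep_none_iff _ _ _ _).1 hstep
          have hfre2 := (hfr ['e']).1 he
          have hres : pvBfs H (k + 1) (steps : Int) fr vis = (steps : Int) := by
            simp only [pvBfs, hstep]
            rw [if_neg (fun h => h.elim hfre hcut)]
          rw [hres]
          refine ⟨Or.inr ⟨steps, hfre2.1, rfl⟩, ?_, by omega⟩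
          intro n hn
          by_contra hlt
          push_neg at hlt
          have hns : n < steps := by exact_mod_cast hlt
          exact hfre2.2 n hns hn
        | some p =>
          obtain ⟨nf, vis'⟩ := p
          have he : ['e'] ∉ fr := fun hx => by
            rw [(pvStep_none_iff _ _ _ _).2 hx] at hstep; cases hstep
          have hspec := pvStep_some_spec _ _ _ _ he _ _ hstep
          have hres : pvBfs H (k + 1) (steps : Int) fr vis
              = pvBfs H k ((steps : Int) + 1) nf vis' := by
            simp only [pvBfs, hstep]
            rw [if_neg (fun h => h.elim hfre hcut)]
          rw [hres, show ((steps : Int) + 1) = ((steps + 1 : ℕ) : Int) by push_cast; ring]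
          have hne' : ∀ j < steps + 1, ¬ pvDer H mol0 ['e'] j := by
            intro j hj hd
            rcases Nat.lt_succ_iff_lt_or_eq.1 hj with hj | rfl
            · exact hne j hj hd
            · exact he ((hfr ['e']).2 ⟨hd, fun i hi hdi => hne i hi hdi⟩)
          have hvis' : ∀ x, x ∈ vis' ↔ ∃ j ≤ steps + 1, pvDer H mol0 x j := by
            intro x
            rw [hspec.1 x]
            constructor
            · rintro (hx | ⟨m, hm, hx⟩)
              · rcases (hvis x).1 hx with ⟨j, hj, hd⟩
                exact ⟨j, by omega, hd⟩
              · exact ⟨steps + 1, le_refl _, pvDer_snoc ((hfr m).1 hm).1 hx⟩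
            · rintro ⟨j, hj, hd⟩
              by_cases hx : x ∈ vis
              · exact Or.inl hx
              · obtain ⟨j0, hd0, hmin⟩ := pvExistsMin (fun j => pvDer H mol0 x j) j hd
                have hj0 : ¬ (j0 ≤ steps) := fun hle => hx ((hvis x).2 ⟨j0, hle, hd0⟩)
                have hj0j : j0 ≤ j := by
                  by_contra hgt
                  push_neg at hgt
                  exact hmin j hgt hd
                have hj0' : j0 = steps + 1 := by omega
                subst hj0'
                rcases pvDer_snoc_iff.1 hd0 with ⟨b, hb, hxb⟩
                have hbmin : ∀ i < steps, ¬ pvDer H mol0 b i :=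
                  fun i hi hdi => hmin (i + 1) (by omega) (pvDer_snoc hdi hxb)
                exact Or.inr ⟨b, (hfr b).2 ⟨hb, hbmin⟩, hxb⟩
          have hfr' : ∀ x, x ∈ nf ↔ pvDer H mol0 x (steps + 1) ∧
              ∀ j < steps + 1, ¬ pvDer H mol0 x j := by
            intro x
            rw [hspec.2 x]
            simp only [List.not_mem_nil, false_or]
            constructor
            · rintro ⟨⟨m, hm, hx⟩, hxv⟩
              exact ⟨pvDer_snoc ((hfr m).1 hm).1 hx,
                fun j hj hd => hxv ((hvis x).2 ⟨j, by omega, hd⟩)⟩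
            · rintro ⟨hd, hmin⟩
              rcases pvDer_snoc_iff.1 hd with ⟨b, hb, hxb⟩
              have hbmin : ∀ i < steps, ¬ pvDer H mol0 b i :=
                fun i hi hdi => hmin (i + 1) (by omega) (pvDer_snoc hdi hxb)
              refine ⟨⟨b, (hfr b).2 ⟨hb, hbmin⟩, hxb⟩, fun hxv => ?_⟩
              rcases (hvis x).1 hxv with ⟨j, hj, hdj⟩
              exact hmin j (by omega) hdj
          exact ih (steps + 1) nf vis' (by omega) hvis' hfr' hne'

lemma pvNoKey_nbrs (hsh_map : List (String × List String)) (mol0 : List Char)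
    (hnk : ∀ p ∈ hsh_map, ¬ p.1.toList <:+: mol0) : pvNbrs (pvDict hsh_map) mol0 = [] := by
  rw [List.eq_nil_iff_forall_not_mem]
  intro y hy
  rcases pvNbrs_decomp _ _ _ hy with ⟨i, j, rep, reps, hij, hjl, hget, hrep, hy2⟩
  rcases pvDict_get?_mem _ _ _ hget with ⟨p, hp, hk, hv⟩
  refine hnk p hp ?_
  rw [hk]
  refine ⟨mol0.take i, (mol0.drop i).drop (j - i), ?_⟩
  rw [List.append_assoc, List.take_append_drop, List.take_append_drop]

lemma pvInt_min_big_zero : min (10 ^ 12 : Int) 0 = 0 := by decide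

-- ===== VERDICT (by name: the statement is the Claim_ definition above) =====
theorem part_2_spec : Claim_equal_part_2 := by
  intro molecule hsh_map hdom hpre
  show part_2 molecule hsh_map = part_2_alt molecule hsh_map
  unfold part_2 part_2_alt
  obtain ⟨F, hF⟩ : ∃ F, pvFuel molecule hsh_map = F + 2 :=
    ⟨2 * 10 ^ 12 *
      ((molecule.toList ++ hsh_map.flatMap (fun p => p.2.flatMap String.toList)).dedup.length + 1) ^
        (molecule.toList.length + 1), by unfold pvFuel; ring⟩
  by_cases hmole : molecule.toList = ['e']
  · -- the molecule is already "e": A pops it and returns 0, B finds it in round 0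
    rw [hF, hmole]
    have hA : pvLoop (pvDict hsh_map) (F + 1 + 1)
        [((([ 'e' ] : List Char).length : Int), 0, (['e'] : List Char))] PySem.Dict.empty
        (10 ^ 12 : Int) = 0 := by
      rw [pvLoop_cons]
      rw [if_pos (by rfl)]
      have : (pvMinEntry ((((['e'] : List Char).length : Int)), 0, (['e'] : List Char)) []) =
          ((((['e'] : List Char).length : Int)), 0, (['e'] : List Char)) := rfl
      rw [this]
      simp only [List.erase_cons_head]
      show min (10 ^ 12 : Int) 0 = 0
      exact pvInt_min_big_zero
    rw [hA]
    have hB : pvBfs (pvDict hsh_map) (10 ^ 12 + 2) 0 [(['e'] : List Char)]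
        (PySem.Set.ofList [(['e'] : List Char)]) = 0 := by
      obtain ⟨k, hk⟩ : ∃ k : Nat, 10 ^ 12 + 2 = k + 1 := ⟨10 ^ 12 + 1, rfl⟩
      rw [hk, pvBfs_succ _ _ _ _ _ (by simp) (by norm_num)]
      rw [show pvStep (pvDict hsh_map) [(['e'] : List Char)] []
            (PySem.Set.ofList [(['e'] : List Char)]) = none from by simp [pvStep]]
    rw [hB]
  · rcases hpre with hshrink | hnk | he
    · -- non-growing rules: both sides compute the capped shortest derivation length
      rw [hF]
      set H := pvDict hsh_map with hH
      set mol0 := molecule.toList with hmol0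
      set L := mol0.length with hLdef
      -- initial invariants for A
      have hsound0 : pvSound H mol0 [((L : Int), 0, mol0)] := by
        intro e he2
        rw [List.mem_singleton] at he2
        subst he2
        exact ⟨0, by simp, pvDer.refl mol0, rfl⟩
      have hseen0 : pvSeenInv H mol0 (PySem.Dict.empty) := by
        intro x v hx
        rw [PySem.Dict.get?_empty] at hx
        cases hx
      have htri0 : pvTriX H [((L : Int), 0, mol0)] PySem.Dict.empty (10 ^ 12 : Int) none := by
        intro x v hx
        rw [PySem.Dict.get?_empty] at hx
        cases hx
      have hphi0 : pvPhi
          (pvAllL (mol0 ++ hsh_map.flatMap (fun p => p.2.flatMap String.toList)).toFinset L)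
          [((L : Int), 0, mol0)] PySem.Dict.empty < F + 2 := by
        unfold pvPhi
        have hterm : ∀ x ∈ pvAllL (mol0 ++ hsh_map.flatMap (fun p => p.2.flatMap String.toList)).toFinset L,
            ((PySem.Dict.empty : PySem.Dict (List Char) Int).getD x (10 ^ 12 : Int)).toNat = 10 ^ 12 := by
          intro x _
          rw [PySem.Dict.getD_eq_get?_getD, PySem.Dict.get?_empty]
          simp only [Option.getD_none]
          rfl
        rw [Finset.sum_congr rfl hterm, Finset.sum_const, smul_eq_mul]
        have hcard := card_pvAllL
          (mol0 ++ hsh_map.flatMap (fun p => p.2.flatMap String.toList)).toFinset L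
        rw [List.card_toFinset] at hcard
        have hfe : F + 2 = 2 + 2 * 10 ^ 12 *
            ((mol0 ++ hsh_map.flatMap (fun p => p.2.flatMap String.toList)).dedup.length + 1) ^ (L + 1) := by
          rw [← hF]; unfold pvFuel; rfl
        rw [hfe]
        set C := (pvAllL (mol0 ++ hsh_map.flatMap (fun p => p.2.flatMap String.toList)).toFinset L).card
          with hC
        set P := ((mol0 ++ hsh_map.flatMap (fun p => p.2.flatMap String.toList)).dedup.length + 1) ^ (L + 1)
          with hP
        simp only [List.length_singleton]
        omega
      have hAlower := pvLoop_lower hsh_map mol0 (F + 2) [((L : Int), 0, mol0)] PySem.Dict.empty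
        (10 ^ 12 : Int) (Or.inl rfl) hsound0
      have hAcap := pvLoop_mono H (F + 2) [((L : Int), 0, mol0)] PySem.Dict.empty (10 ^ 12 : Int)
      have hAupper : ∀ n : ℕ, pvDer H mol0 ['e'] n →
          pvLoop H (F + 2) [((L : Int), 0, mol0)] PySem.Dict.empty (10 ^ 12 : Int) ≤ (n : Int) := by
        intro n hn
        have := (pvLoop_upper hsh_map mol0 hshrink n (F + 2) [((L : Int), 0, mol0)]
          PySem.Dict.empty (10 ^ 12 : Int) (le_refl _) hphi0 hsound0 hseen0 htri0).1
          ((L : Int), 0, mol0) (List.mem_singleton.2 rfl) hn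
        simpa using this
      -- B facts
      have hvis0 : ∀ x, x ∈ (PySem.Set.ofList [mol0]) ↔ ∃ j ≤ 0, pvDer H mol0 x j := by
        intro x
        rw [PySem.Set.mem_ofList, List.mem_singleton]
        constructor
        · rintro rfl
          exact ⟨0, le_refl _, pvDer.refl _⟩
        · rintro ⟨j, hj, hd⟩
          interval_cases j
          exact (pvDer_zero hd).symm
      have hfr0 : ∀ x, x ∈ [mol0] ↔ pvDer H mol0 x 0 ∧ ∀ j < 0, ¬ pvDer H mol0 x j := by
        intro x
        rw [List.mem_singleton]
        constructor
        · rintro rfl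
          exact ⟨pvDer.refl _, fun j hj => absurd hj (by omega)⟩
        · rintro ⟨hd, _⟩
          exact (pvDer_zero hd).symm
      have hB := pvBfs_correct H mol0 (10 ^ 12 + 2) 0 [mol0] (PySem.Set.ofList [mol0])
        (by omega) hvis0 hfr0 (fun j hj => absurd hj (by omega))
      rw [Nat.cast_zero] at hB
      obtain ⟨hBlower, hBupper, hBcap⟩ := hB
      -- uniqueness
      rcases hAlower with hA | ⟨n1, hd1, hA⟩
      · rcases hBlower with hBv | ⟨n2, hd2, hBv⟩
        · rw [hA, hBv]
        · have h1 := hAupper n2 hd2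
          rw [hA] at h1 hAcap ⊢
          rw [hBv] at hBcap ⊢
          omega
      · rcases hBlower with hBv | ⟨n2, hd2, hBv⟩
        · have h1 := hBupper n1 hd1
          rw [hA] at hAcap ⊢
          rw [hBv] at h1 ⊢
          omega
        · have h1 := hAupper n2 hd2
          have h2 := hBupper n1 hd1
          rw [hA] at h1 ⊢
          rw [hBv] at h2 ⊢
          omega
    · -- no key occurs in the molecule: nothing is ever replaced
      have hnbrs := pvNoKey_nbrs hsh_map molecule.toList hnk
      rw [hF]
      have hA : pvLoop (pvDict hsh_map) (F + 1 + 1)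
          [((molecule.toList.length : Int), 0, molecule.toList)] PySem.Dict.empty
          (10 ^ 12 : Int) = 10 ^ 12 := by
        rw [pvLoop_cons]
        have hmin : pvMinEntry ((molecule.toList.length : Int), 0, molecule.toList) [] =
            ((molecule.toList.length : Int), 0, molecule.toList) := rfl
        rw [hmin, if_neg (by exact hmole)]
        simp only [List.erase_cons_head]
        rw [pvExpand_eq_fold]
        rw [hnbrs, List.foldl_nil]
        rfl
      rw [hA]
      have hstep : pvStep (pvDict hsh_map) [molecule.toList] [] (PySem.Set.ofList [molecule.toList])
          = some ([], PySem.Set.ofList [molecule.toList]) := by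
        simp only [pvStep, if_neg hmole, hnbrs, List.foldl_nil]
      have hB : pvBfs (pvDict hsh_map) (10 ^ 12 + 2) 0 [molecule.toList]
          (PySem.Set.ofList [molecule.toList]) = 10 ^ 12 := by
        obtain ⟨k, hk⟩ : ∃ k : Nat, 10 ^ 12 + 2 = k + 1 := ⟨10 ^ 12 + 1, rfl⟩
        rw [hk, pvBfs_succ _ _ _ _ _ (by simp) (by norm_num), hstep]
        exact pvBfs_empty _ _ _ _
      rw [hB]
    · exact absurd (by rw [he]; rfl) hmole
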